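-- pv_equiv track=rewrite | github.com/watchstep/TIS-python | BAEKJOON/silver5/4659.py | check_triple
-- ===== SOURCE A (Python) =====
-- vowels = 'aeiou'
--
-- def check_triple(password):
--   if len(password) > 2:
--     for i in range(len(password)-2):
--       if password[i] in vowels and password[i+1] in vowels and password[i+2] in vowels:
--         return False
--       elif password[i] not in vowels and password[i+1] not in vowels and password[i+2] not in vowels:
--         return False
--   return True
-- ===== SOURCE B (Python) =====
-- vowels = 'aeiou'
--
-- def check_triple(password):
--   # Run-length encode the password by character class (vowel / consonant),
--   # then check that no run of a single class reaches length 3.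
--   runs = []
--   for c in password:
--     k = c in vowels
--     if runs and runs[-1][0] == k:
--       runs[-1][1] += 1
--     else:
--       runs.append([k, 1])
--   return all(n < 3 for k, n in runs)
-- ===== Notes on version B (the rewrite author's own statement) =====
-- stated objective: alternative
-- what changed: B run-length encodes the string into maximal same-class (vowel/consonant) runs and checks that no run has length >= 3, instead of A's overlapping 3-wide index window scan with early return.
import Mathlib
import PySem

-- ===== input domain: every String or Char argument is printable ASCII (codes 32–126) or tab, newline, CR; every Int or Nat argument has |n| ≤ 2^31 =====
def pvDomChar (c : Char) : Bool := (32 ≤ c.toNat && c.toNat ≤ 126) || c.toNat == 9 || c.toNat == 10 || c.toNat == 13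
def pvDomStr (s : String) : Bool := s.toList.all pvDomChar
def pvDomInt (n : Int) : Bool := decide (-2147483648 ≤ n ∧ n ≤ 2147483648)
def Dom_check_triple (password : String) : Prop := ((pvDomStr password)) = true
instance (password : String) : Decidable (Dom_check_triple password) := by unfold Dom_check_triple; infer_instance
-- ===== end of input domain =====

-- B replaces A's overlapping 3-wide window scan by a run-length encoding of the
-- string into maximal same-class (vowel/consonant) runs, checking no run reaches 3
-- (objective: alternative).

def pvVowels : List Char := ['a', 'e', 'i', 'o', 'u']

def pvIsV (c : Char) : Bool := pvVowels.contains c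

-- ===== PORT A =====
def check_triple (password : String) : Bool :=
  let l := password.toList
  if l.length > 2 then
    (PySem.List.pyRange 0 ((l.length : Int) - 2) 1).foldl
      (fun acc i =>
        if acc then
          -- password[i] in vowels and password[i+1] in vowels and password[i+2] in vowels
          if pvIsV (PySem.List.pyGetD l i ' ') && pvIsV (PySem.List.pyGetD l (i + 1) ' ')
              && pvIsV (PySem.List.pyGetD l (i + 2) ' ') then false
          -- elif … not in … and … not in … and … not in …
          else if !pvIsV (PySem.List.pyGetD l i ' ') && !pvIsV (PySem.List.pyGetD l (i + 1) ' ')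
              && !pvIsV (PySem.List.pyGetD l (i + 2) ' ') then false
          else acc
        else false)  -- early `return False` already taken
      true
  else true

-- ===== PORT B =====
-- `runs` is kept reversed: the list head is Python's `runs[-1]`.
def pvRunsStep (rs : List (Bool × Nat)) (c : Char) : List (Bool × Nat) :=
  let k := pvIsV c
  match rs with
  | (k', n) :: rest => if k' = k then (k', n + 1) :: rest else (k, 1) :: (k', n) :: rest
  | [] => [(k, 1)]

def check_triple_alt (password : String) : Bool :=
  (password.toList.foldl pvRunsStep []).all (fun p => p.2 < 3)

-- ===== PRECONDITION & SPEC =====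
def Spec_check_triple (password : String) (out : Bool) : Prop := out = check_triple_alt password
instance (password : String) (out : Bool) : Decidable (Spec_check_triple password out) := by unfold Spec_check_triple; infer_instance

-- ===== CLAIM (what is proved, stated in full; the proofs are below) =====
def Claim_equal_check_triple : Prop := ∀ (password : String), Dom_check_triple password → Spec_check_triple password (check_triple password)

-- ===== LEMMAS AND PROOFS =====

-- A's window scan as a structural recursion on the character list.
def pvARec : List Char → Bool
  | a :: b :: c :: t =>
      if pvIsV a && pvIsV b && pvIsV c then false
      else if !pvIsV a && !pvIsV b && !pvIsV c then false
      else pvARec (b :: c :: t)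
  | _ => true

-- Run scanner: current class `k`, current run length `n`.
def pvCRec : Bool → Nat → List Char → Bool
  | _, _, [] => true
  | k, n, x :: xs =>
      if pvIsV x = k then (if 3 ≤ n + 1 then false else pvCRec k (n + 1) xs)
      else pvCRec (pvIsV x) 1 xs

theorem pvARec_short (l : List Char) (h : l.length ≤ 2) : pvARec l = true := by
  match l with
  | [] => rfl
  | [a] => rfl
  | [a, b] => rfl
  | a :: b :: c :: t => simp at h

theorem pvARec_eq_cRec (t : List Char) : ∀ a b : Char,
    pvARec (a :: b :: t) = pvCRec (pvIsV b) (if pvIsV a = pvIsV b then 2 else 1) t := by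
  induction t with
  | nil => intro a b; simp [pvARec, pvCRec]
  | cons c t ih =>
    intro a b
    by_cases hab : pvIsV a = pvIsV b <;> by_cases hbc : pvIsV b = pvIsV c <;>
      cases hva : pvIsV a <;> cases hvb : pvIsV b <;> cases hvc : pvIsV c <;>
        simp_all [pvARec, pvCRec, ih b c]

theorem pvRunsStep_nil (c : Char) : pvRunsStep [] c = [(pvIsV c, 1)] := rfl

theorem pvRunsStep_cons (k' : Bool) (n : Nat) (rest : List (Bool × Nat)) (c : Char) :
    pvRunsStep ((k', n) :: rest) c =
      if k' = pvIsV c then (k', n + 1) :: rest else (pvIsV c, 1) :: (k', n) :: rest := rfl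

theorem pvCRec_cons (k : Bool) (n : Nat) (x : Char) (xs : List Char) :
    pvCRec k n (x :: xs) =
      if pvIsV x = k then (if 3 ≤ n + 1 then false else pvCRec k (n + 1) xs)
      else pvCRec (pvIsV x) 1 xs := rfl

theorem pvCRec_start (l : List Char) : pvARec l =
    (match l with | [] => true | a :: t => pvCRec (pvIsV a) 1 t) := by
  match l with
  | [] => rfl
  | [a] => rfl
  | a :: b :: t =>
    rw [pvARec_eq_cRec t a b]
    show _ = pvCRec (pvIsV a) 1 (b :: t)
    rw [pvCRec_cons]
    by_cases h : pvIsV b = pvIsV a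
    · rw [if_pos h, if_neg (by omega : ¬ 3 ≤ 1 + 1), if_pos h.symm, h]
    · rw [if_neg h, if_neg (fun hh => h hh.symm)]

theorem pvRuns_bad (xs : List Char) : ∀ acc : List (Bool × Nat),
    (∃ p ∈ acc, ¬ p.2 < 3) → (xs.foldl pvRunsStep acc).all (fun p => p.2 < 3) = false := by
  induction xs with
  | nil =>
    intro acc ⟨p, hp, h3⟩
    simp only [List.foldl_nil, List.all_eq_false]
    exact ⟨p, hp, by simpa using h3⟩
  | cons x xs ih =>
    intro acc hacc
    obtain ⟨p, hp, h3⟩ := hacc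
    match acc with
    | [] => simp at hp
    | (k', n) :: rest =>
      simp only [List.foldl_cons, pvRunsStep_cons]
      by_cases hk : k' = pvIsV x
      · rw [if_pos hk]
        rcases List.mem_cons.mp hp with h | h
        · exact ih _ ⟨(k', n + 1), List.mem_cons_self, by
            rw [h] at h3; simp at h3 ⊢; omega⟩
        · exact ih _ ⟨p, List.mem_cons_of_mem _ h, h3⟩
      · rw [if_neg hk]
        exact ih _ ⟨p, List.mem_cons_of_mem _ hp, h3⟩

-- The run scanner agrees with run-length encoding + `all` check.
theorem pvCRec_eq_runs (xs : List Char) : ∀ (k : Bool) (n : Nat) (rest : List (Bool × Nat)),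
    n < 3 → rest.all (fun p => p.2 < 3) = true →
    pvCRec k n xs = (xs.foldl pvRunsStep ((k, n) :: rest)).all (fun p => p.2 < 3) := by
  induction xs with
  | nil =>
    intro k n rest hn hrest
    simp [pvCRec, List.all_cons, hn, hrest]
  | cons x xs ih =>
    intro k n rest hn hrest
    rw [List.foldl_cons, pvRunsStep_cons]
    rw [pvCRec_cons]
    by_cases hk : pvIsV x = k
    · rw [if_pos hk, if_pos hk.symm]
      by_cases h3 : 3 ≤ n + 1
      · rw [if_pos h3, pvRuns_bad]
        exact ⟨(k, n + 1), List.mem_cons_self, by simp; omega⟩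
      · rw [if_neg h3]
        exact ih k (n + 1) rest (by omega) hrest
    · rw [if_neg hk, if_neg (fun h => hk h.symm)]
      exact ih (pvIsV x) 1 ((k, n) :: rest) (by omega) (by simp [List.all_cons, hn, hrest])

theorem pvB_eq_cRec (l : List Char) :
    (l.foldl pvRunsStep []).all (fun p => p.2 < 3) =
    (match l with | [] => true | a :: t => pvCRec (pvIsV a) 1 t) := by
  match l with
  | [] => rfl
  | a :: t =>
    rw [List.foldl_cons, pvRunsStep_nil]
    exact (pvCRec_eq_runs t (pvIsV a) 1 [] (by omega) rfl).symm

theorem pvARec_cons3 (a b c : Char) (t : List Char) :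
    pvARec (a :: b :: c :: t) =
      (if pvIsV a && pvIsV b && pvIsV c then false
       else if !pvIsV a && !pvIsV b && !pvIsV c then false
       else pvARec (b :: c :: t)) := rfl

theorem pvFoldl_false (f : Bool → Int → Bool) (hf : ∀ i, f false i = false) :
    ∀ r : List Int, r.foldl f false = false := by
  intro r
  induction r with
  | nil => rfl
  | cons x xs ih => rw [List.foldl_cons, hf]; exact ih

-- A's indexed loop, started at index j, equals the structural window scan on l.drop j.
theorem pvA_fold_eq (l : List Char) (f : Bool → Int → Bool)
    (hf : f = fun acc i =>
        if acc then
          if pvIsV (PySem.List.pyGetD l i ' ') && pvIsV (PySem.List.pyGetD l (i + 1) ' ')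
              && pvIsV (PySem.List.pyGetD l (i + 2) ' ') then false
          else if !pvIsV (PySem.List.pyGetD l i ' ') && !pvIsV (PySem.List.pyGetD l (i + 1) ' ')
              && !pvIsV (PySem.List.pyGetD l (i + 2) ' ') then false
          else acc
        else false) :
    ∀ (j : Nat), j ≤ l.length →
      (PySem.List.pyRange (j : Int) ((l.length : Int) - 2) 1).foldl f true = pvARec (l.drop j) := by
  have hffalse : ∀ i, f false i = false := by intro i; rw [hf]; simp
  suffices key : ∀ (m j : Nat), j ≤ l.length → l.length - j = m →
      (PySem.List.pyRange (j : Int) ((l.length : Int) - 2) 1).foldl f true = pvARec (l.drop j) by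
    intro j hj; exact key _ j hj rfl
  intro m
  induction m with
  | zero =>
    intro j hj hm
    rw [PySem.List.pyRange_one_eq_nil (by omega), List.foldl_nil,
      pvARec_short _ (by simp; omega)]
  | succ m ih =>
    intro j hj hm
    by_cases hlt : (j : Int) < (l.length : Int) - 2
    · have h0 : j < l.length := by omega
      have h1 : j + 1 < l.length := by omega
      have h2 : j + 2 < l.length := by omega
      have e0 : PySem.List.pyGetD l (j : Int) ' ' = l[j] := by
        rw [PySem.List.pyGetD_natCast, List.getD_eq_getElem]
      have e1 : PySem.List.pyGetD l ((j : Int) + 1) ' ' = l[j + 1] := by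
        rw [show ((j : Int) + 1) = ((j + 1 : Nat) : Int) by push_cast; ring,
          PySem.List.pyGetD_natCast, List.getD_eq_getElem]
      have e2 : PySem.List.pyGetD l ((j : Int) + 2) ' ' = l[j + 2] := by
        rw [show ((j : Int) + 2) = ((j + 2 : Nat) : Int) by push_cast; ring,
          PySem.List.pyGetD_natCast, List.getD_eq_getElem]
      have hft : f true j = (if pvIsV l[j] && pvIsV l[j + 1] && pvIsV l[j + 2] then false
          else if !pvIsV l[j] && !pvIsV l[j + 1] && !pvIsV l[j + 2] then false
          else true) := by
        rw [hf]; simp only [e0, e1, e2, Bool.if_true_right]; rfl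
      have hd : l.drop j = l[j] :: l[j + 1] :: l[j + 2] :: l.drop (j + 3) := by
        rw [List.drop_eq_getElem_cons h0, List.drop_eq_getElem_cons h1,
          List.drop_eq_getElem_cons h2]
      have hd1 : l.drop (j + 1) = l[j + 1] :: l[j + 2] :: l.drop (j + 3) := by
        rw [List.drop_eq_getElem_cons h1, List.drop_eq_getElem_cons h2]
      rw [PySem.List.pyRange_one_cons hlt, List.foldl_cons, hft, hd, pvARec_cons3, ← hd1]
      split_ifs with hc1 hc2
      · exact pvFoldl_false f hffalse _
      · exact pvFoldl_false f hffalse _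
      · rw [show ((j : Int) + 1) = ((j + 1 : Nat) : Int) by push_cast; ring]
        exact ih (j + 1) (by omega) (by omega)
    · rw [PySem.List.pyRange_one_eq_nil (by omega), List.foldl_nil,
        pvARec_short _ (by simp; omega)]

theorem check_triple_alt_eq (password : String) :
    check_triple_alt password = pvARec password.toList := by
  rw [check_triple_alt, pvB_eq_cRec, pvCRec_start]

-- ===== VERDICT (by name: the statement is the Claim_ definition above) =====
theorem check_triple_spec : Claim_equal_check_triple := by
  intro password _
  show check_triple password = check_triple_alt password
  rw [check_triple_alt_eq]
  simp only [check_triple]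
  by_cases h : password.toList.length > 2
  · rw [if_pos h]
    have := pvA_fold_eq password.toList _ rfl 0 (by omega)
    simpa using this
  · rw [if_neg h, pvARec_short _ (by omega)]
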